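-- pv_equiv track=rewrite | github.com/nstephenh/BSCopy | util/text_utils.py | get_section_heatmap
-- ===== SOURCE A (Python) =====
-- def get_section_heatmap(section_text):
--     heatmap = []
--     lines = section_text.splitlines()
--
--     # First, find the longest line
--     # Populate empty slots in the heatmap
--     heatmap = [0] * len(max(lines, key=len))
--
--     # For each line, track whitespace and characters past the end of the line
--     for line in section_text.splitlines():
--         for char_index in range(len(heatmap)):
--             if char_index >= len(line) or line[char_index] == " ":
--                 heatmap[char_index] += 1
--     return heatmap
-- ===== SOURCE B (Python) =====
-- def get_section_heatmap(section_text):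
--     lines = section_text.splitlines()
--     maxlen = 0
--     for line in lines:
--         if len(line) > maxlen:
--             maxlen = len(line)
--     diff = [0] * (maxlen + 1)
--     heat = [0] * maxlen
--     for line in lines:
--         diff[len(line)] += 1
--         for i, ch in enumerate(line):
--             if ch == " ":
--                 heat[i] += 1
--     run = 0
--     for i in range(maxlen):
--         run += diff[i]
--         heat[i] += run
--     return heat
-- ===== Notes on version B (the rewrite author's own statement) =====
-- stated objective: alternative
-- what changed: A scans every line over every column of the longest line (lines x maxlen); B instead makes one pass over the actual characters counting spaces per column, records each line length in a difference array, and recovers the beyond-end counts with a single prefix-sum over the columns.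
-- outside the precondition, e.g. on get_section_heatmap(''): A raises ValueError, B returns []
-- crash fix: On the empty string A raises ValueError (max() of an empty sequence); B returns []. — e.g. on get_section_heatmap(""): A raises ValueError, B returns []
import Mathlib
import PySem

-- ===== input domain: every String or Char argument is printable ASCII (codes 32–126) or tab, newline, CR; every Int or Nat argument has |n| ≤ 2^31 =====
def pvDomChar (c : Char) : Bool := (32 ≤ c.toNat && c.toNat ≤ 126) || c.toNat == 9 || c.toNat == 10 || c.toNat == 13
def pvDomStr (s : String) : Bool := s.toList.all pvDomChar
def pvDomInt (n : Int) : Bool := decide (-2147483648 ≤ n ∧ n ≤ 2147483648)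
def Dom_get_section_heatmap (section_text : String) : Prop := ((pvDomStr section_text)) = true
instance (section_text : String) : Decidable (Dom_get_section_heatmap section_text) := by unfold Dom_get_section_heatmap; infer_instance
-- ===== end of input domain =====

-- B replaces A's lines × columns double scan by one pass over the actual characters plus a
-- difference-array/prefix-sum for the beyond-end counts (objective: alternative algorithm).

-- ===== PORT A =====
def get_section_heatmap (section_text : String) : List Int :=
  let lines := PySem.Str.splitlines section_text
  match PySem.List.max? lines PySem.Str.len with
  | none => []   -- Python: max([], key=len) raises ValueError; excluded by Pre_
  | some longest =>
    let heatmap : List Int := List.replicate (PySem.Str.len longest).toNat 0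
    lines.foldl (fun h line =>
      (List.range h.length).foldl (fun (h : List Int) (ci : Nat) =>
        if PySem.Str.len line ≤ (ci : Int) ∨ PySem.Str.pyGet? line (ci : Int) = some ' '
        then h.set ci (h.getD ci 0 + 1) else h) h) heatmap

-- ===== PORT B =====
def get_section_heatmap_alt (section_text : String) : List Int :=
  let lines := PySem.Str.splitlines section_text
  let maxlen : Int := lines.foldl (fun m line => if PySem.Str.len line > m then PySem.Str.len line else m) 0
  let diff : List Int := List.replicate (maxlen.toNat + 1) 0
  let heat : List Int := List.replicate maxlen.toNat 0
  let dh := lines.foldl (fun (p : List Int × List Int) line =>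
      (p.1.set (PySem.Str.len line).toNat (p.1.getD (PySem.Str.len line).toNat 0 + 1),
       (PySem.List.enumerate line.toList).foldl (fun h e =>
          if e.2 = ' ' then h.set e.1.toNat (h.getD e.1.toNat 0 + 1) else h) p.2))
    (diff, heat)
  let rh := (List.range maxlen.toNat).foldl (fun (p : Int × List Int) i =>
      let run := p.1 + dh.1.getD i 0
      (run, p.2.set i (p.2.getD i 0 + run))) ((0 : Int), dh.2)
  rh.2

-- ===== PRECONDITION & SPEC =====
-- Pre_ excludes only the empty string, on which Python A raises ValueError (max of an empty sequence).
def Pre_get_section_heatmap (section_text : String) : Prop := section_text ≠ ""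
instance (section_text : String) : Decidable (Pre_get_section_heatmap section_text) := by unfold Pre_get_section_heatmap; infer_instance
def pvWitness_get_section_heatmap : String := "a b"

-- On the empty string A raises ValueError (max() of an empty sequence); B returns the empty heatmap [].
def Raises_get_section_heatmap (section_text : String) : Prop := section_text = ""
instance (section_text : String) : Decidable (Raises_get_section_heatmap section_text) := by unfold Raises_get_section_heatmap; infer_instance
def pvRaiseWitness_get_section_heatmap : String := ""
def pvRaiseWitnessOut_get_section_heatmap : List Int := []

def Spec_get_section_heatmap (section_text : String) (out : List Int) : Prop := out = get_section_heatmap_alt section_text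
instance (section_text : String) (out : List Int) : Decidable (Spec_get_section_heatmap section_text out) := by unfold Spec_get_section_heatmap; infer_instance

-- ===== CLAIM (what is proved, stated in full; the proofs are below) =====
def Claim_equal_get_section_heatmap : Prop := ∀ (section_text : String), Dom_get_section_heatmap section_text → Pre_get_section_heatmap section_text → Spec_get_section_heatmap section_text (get_section_heatmap section_text)
def Claim_raises_get_section_heatmap : Prop := (∀ (section_text : String), Dom_get_section_heatmap section_text → Raises_get_section_heatmap section_text → ¬ Pre_get_section_heatmap section_text) ∧ (Dom_get_section_heatmap (pvRaiseWitness_get_section_heatmap) ∧ Raises_get_section_heatmap (pvRaiseWitness_get_section_heatmap) ∧ get_section_heatmap_alt (pvRaiseWitness_get_section_heatmap) = pvRaiseWitnessOut_get_section_heatmap)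

-- ===== LEMMAS AND PROOFS =====

-- splitlines of a nonempty string is a nonempty list
theorem pv_go_ne_nil (isB : Char → Bool) (cs cur : List Char) (acc : List (List Char))
    (h : cs ≠ [] ∨ cur ≠ [] ∨ acc ≠ []) : PySem.Chars.splitlines.go isB cs cur acc ≠ [] := by
  fun_induction PySem.Chars.splitlines.go isB cs cur acc <;> simp_all

theorem pv_splitlines_ne_nil (s : String) (h : s ≠ "") : PySem.Str.splitlines s ≠ [] := by
  have h2 : s.toList ≠ [] := fun hc => h (String.toList_eq_nil_iff.mp hc)
  intro hc
  have h3 := congrArg (List.map String.toList) hc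
  rw [PySem.Str.splitlines_map_toList] at h3
  simp only [List.map_nil] at h3
  exact pv_go_ne_nil _ s.toList [] [] (by tauto) (by simpa [PySem.Chars.splitlines] using h3)

-- pointwise congruence for mapIdx
theorem pv_mapIdx_congr {α : Type} (f g : Nat → α → α) (h : List α)
    (hfg : ∀ i, i < h.length → ∀ x, f i x = g i x) : h.mapIdx f = h.mapIdx g := by
  apply List.ext_getElem (by simp)
  intro i h1 h2
  simp only [List.getElem_mapIdx]
  exact hfg i (by simpa using h1) _

-- a fold of "+1 at position j" over a list of in-range positions counts occurrences
theorem pv_setincr_count (ps : List Nat) (h : List Int) (hb : ∀ j ∈ ps, j < h.length) :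
    ps.foldl (fun h i => h.set i (h.getD i 0 + 1)) h
      = h.mapIdx (fun i x => x + (ps.count i : Int)) := by
  induction ps generalizing h with
  | nil => apply List.ext_getElem (by simp); intro i h1 h2; simp
  | cons j ps ih =>
    simp only [List.foldl_cons]
    rw [ih _ (by intro a ha; simpa using hb a (by simp [ha]))]
    apply List.ext_getElem (by simp)
    intro i h1 h2
    have hj : j < h.length := hb j (by simp)
    simp only [List.getElem_mapIdx, List.getElem_set, List.getD_eq_getElem?_getD]
    by_cases hij : j = i
    · subst hij
      simp [List.getElem?_eq_getElem hj]
      try ring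
    · simp [hij]
      try ring

-- folding per-element "mapIdx add" accumulates the sum of contributions
theorem pv_foldl_mapIdx_sum {α : Type} (c : α → Nat → Int) (ls : List α) (h : List Int) :
    ls.foldl (fun h a => h.mapIdx (fun i x => x + c a i)) h
      = h.mapIdx (fun i x => x + (ls.map (fun a => c a i)).sum) := by
  induction ls generalizing h with
  | nil => apply List.ext_getElem (by simp); intro i h1 h2; simp
  | cons a ls ih =>
    simp only [List.foldl_cons]
    rw [ih]
    apply List.ext_getElem (by simp)
    intro i h1 h2
    simp only [List.getElem_mapIdx, List.map_cons, List.sum_cons]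
    ring

-- replace the fold body by a length-preserving equal one, under a length invariant
theorem pv_foldl_congr_len {α : Type} (ls : List α) (f g : List Int → α → List Int)
    (h : List Int) (N : Nat) (hN : h.length = N)
    (hg : ∀ h' a, (g h' a).length = h'.length)
    (hfg : ∀ h' a, a ∈ ls → h'.length = N → f h' a = g h' a) :
    ls.foldl f h = ls.foldl g h := by
  induction ls generalizing h with
  | nil => rfl
  | cons a ls ih =>
    simp only [List.foldl_cons]
    rw [hfg h a (by simp) hN]
    exact ih (g h a) (by rw [hg, hN]) (fun h' b hb hl => hfg h' b (by simp [hb]) hl)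

-- A's inner column loop, as a mapIdx
theorem pv_innerA_eq (line : String) (h : List Int) :
    (List.range h.length).foldl (fun (h : List Int) (ci : Nat) =>
        if PySem.Str.len line ≤ (ci : Int) ∨ PySem.Str.pyGet? line (ci : Int) = some ' '
        then h.set ci (h.getD ci 0 + 1) else h) h
      = h.mapIdx (fun i x => x +
          (if PySem.Str.len line ≤ (i : Int) ∨ PySem.Str.pyGet? line (i : Int) = some ' '
           then 1 else 0)) := by
  have h1 : (fun (h : List Int) (ci : Nat) =>
      if PySem.Str.len line ≤ (ci : Int) ∨ PySem.Str.pyGet? line (ci : Int) = some ' '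
      then h.set ci (h.getD ci 0 + 1) else h)
      = (fun (h : List Int) (ci : Nat) =>
        if (fun ci : Nat => decide (PySem.Str.len line ≤ (ci : Int) ∨ PySem.Str.pyGet? line (ci : Int) = some ' ')) ci = true
        then h.set ci (h.getD ci 0 + 1) else h) := by
    funext h ci
    by_cases hc : PySem.Str.len line ≤ (ci : Int) ∨ PySem.Str.pyGet? line (ci : Int) = some ' ' <;> simp
  rw [h1, ← List.foldl_filter,
    pv_setincr_count _ _ (by intro j hj; simp only [List.mem_filter, List.mem_range] at hj; exact hj.1)]
  apply pv_mapIdx_congr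
  intro i hi x
  by_cases hc : PySem.Str.len line ≤ (i : Int) ∨ PySem.Str.pyGet? line (i : Int) = some ' '
  · rw [List.count_filter (by simp only [decide_eq_true_eq]; exact hc)]
    rw [List.count_range, if_pos hi, if_pos hc]
    norm_num
  · rw [List.count_eq_zero.2 (by
      simp only [List.mem_filter, List.mem_range, decide_eq_true_eq]
      exact fun hmem => hc hmem.2), if_neg hc]
    norm_num

-- positions produced by enumerate are below k + cs.length
theorem pv_enum_count (cs : List Char) (k i : Nat) :
    ((((PySem.List.enumerate cs (k : Int)).filter (fun e => decide (e.2 = ' '))).map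
        (fun e => e.1.toNat)).count i)
      = if k ≤ i ∧ cs[i - k]? = some ' ' then 1 else 0 := by
  induction cs generalizing k with
  | nil => simp [PySem.List.enumerate]
  | cons c cs ih =>
    have hunf : PySem.List.enumerate (c :: cs) (k : Int) = ((k : Int), c) :: PySem.List.enumerate cs ((k : Int) + 1) := rfl
    have hcast : ((k : Int) + 1) = ((k + 1 : Nat) : Int) := by push_cast; ring
    rw [hunf, hcast]
    have htail := ih (k + 1)
    push_cast at htail
    rcases Nat.lt_trichotomy i k with hik | hik | hik
    · -- i < k : everything is 0
      have t1 : ¬ (k + 1 ≤ i) := by omega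
      have t2 : ¬ (k ≤ i) := by omega
      by_cases hc : c = ' ' <;>
        simp [hc, htail, t1, t2, List.count_cons] <;> omega
    · -- i = k
      subst hik
      have t1 : ¬ (i + 1 ≤ i) := by omega
      by_cases hc : c = ' ' <;>
        simp [hc, htail, t1]
    · -- k < i
      have t1 : k + 1 ≤ i := by omega
      have t2 : k ≤ i := by omega
      have h2 : i - k = (i - (k + 1)) + 1 := by omega
      by_cases hc : c = ' ' <;>
        simp [hc, htail, t1, t2, h2, List.count_cons, List.getElem?_cons_succ] <;> omega

theorem pv_enum_pos_lt (cs : List Char) (k : Nat) :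
    ∀ e ∈ PySem.List.enumerate cs (k : Int), (k : Int) ≤ e.1 ∧ e.1 < (k : Int) + cs.length := by
  induction cs generalizing k with
  | nil => simp [PySem.List.enumerate]
  | cons c cs ih =>
    have hunf : PySem.List.enumerate (c :: cs) (k : Int) = ((k : Int), c) :: PySem.List.enumerate cs ((k : Int) + 1) := rfl
    have hcast : ((k : Int) + 1) = ((k + 1 : Nat) : Int) := by push_cast; ring
    rw [hunf, hcast]
    intro e he
    rcases List.mem_cons.mp he with h | h
    · subst h
      refine ⟨le_refl _, ?_⟩
      simp only [List.length_cons]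
      push_cast
      omega
    · have := ih (k + 1) e h
      simp only [List.length_cons]
      push_cast at this ⊢
      omega

-- B's per-line space scan, as a mapIdx
theorem pv_innerB_eq (line : String) (h : List Int) (hb : line.toList.length ≤ h.length) :
    (PySem.List.enumerate line.toList).foldl (fun h e =>
        if e.2 = ' ' then h.set e.1.toNat (h.getD e.1.toNat 0 + 1) else h) h
      = h.mapIdx (fun i x => x + (if line.toList[i]? = some ' ' then 1 else 0)) := by
  have h0 : PySem.List.enumerate line.toList = PySem.List.enumerate line.toList ((0 : Nat) : Int) := rfl
  rw [h0]
  have h1 : (fun (h : List Int) (e : Int × Char) =>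
      if e.2 = ' ' then h.set e.1.toNat (h.getD e.1.toNat 0 + 1) else h)
      = (fun (h : List Int) (e : Int × Char) =>
        if (fun e : Int × Char => decide (e.2 = ' ')) e = true
        then h.set e.1.toNat (h.getD e.1.toNat 0 + 1) else h) := by
    funext h e
    by_cases hc : e.2 = ' ' <;> simp [hc]
  rw [h1, ← List.foldl_filter,
    ← List.foldl_map (f := fun e : Int × Char => e.1.toNat) (g := fun (h : List Int) (j : Nat) => h.set j (h.getD j 0 + 1)),
    pv_setincr_count _ _ (by
      intro j hj
      simp only [List.mem_map, List.mem_filter] at hj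
      obtain ⟨e, ⟨hmem, _⟩, rfl⟩ := hj
      have hlt := pv_enum_pos_lt line.toList 0 e hmem
      simp only [Nat.cast_zero, zero_add] at hlt
      omega)]
  apply pv_mapIdx_congr
  intro i hi x
  rw [pv_enum_count line.toList 0 i]
  simp

-- the prefix-sum loop of B
theorem pv_prefix_fold (d : List Int) (n : Nat) (r0 : Int) (h : List Int) (hn : n ≤ h.length) :
    (List.range n).foldl (fun (p : Int × List Int) i =>
        (p.1 + d.getD i 0, p.2.set i (p.2.getD i 0 + (p.1 + d.getD i 0)))) (r0, h)
      = (r0 + ∑ l ∈ Finset.range n, d.getD l 0,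
         h.mapIdx (fun i x => if i < n then x + (r0 + ∑ l ∈ Finset.range (i + 1), d.getD l 0) else x)) := by
  induction n with
  | zero =>
    simp only [List.range_zero, List.foldl_nil, Finset.range_zero, Finset.sum_empty, add_zero]
    refine Prod.ext rfl ?_
    apply List.ext_getElem (by simp)
    intro i h1 h2
    simp
  | succ n ih =>
    rw [List.range_succ, List.foldl_append, ih (by omega)]
    simp only [List.foldl_cons, List.foldl_nil]
    refine Prod.ext ?_ ?_
    · show (r0 + ∑ l ∈ Finset.range n, d.getD l 0) + d.getD n 0 = r0 + ∑ l ∈ Finset.range (n + 1), d.getD l 0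
      rw [Finset.sum_range_succ]
      ring
    · show (h.mapIdx _).set n _ = _
      apply List.ext_getElem (by simp)
      intro i hi1 hi2
      have hn : n < h.length := by omega
      have hgetD : (h.mapIdx (fun i x => if i < n then x + (r0 + ∑ l ∈ Finset.range (i + 1), d.getD l 0) else x)).getD n 0
          = h[n] := by
        rw [List.getD_eq_getElem?_getD, List.getElem?_eq_getElem (by simpa using hn)]
        simp
      simp only [List.getElem_set, List.getElem_mapIdx, hgetD]
      by_cases hin : n = i
      · subst hin
        rw [if_pos rfl, if_pos (show n < n + 1 by omega), Finset.sum_range_succ]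
        ring
      · rw [if_neg hin]
        by_cases hlt : i < n
        · rw [if_pos hlt, if_pos (by omega)]
        · rw [if_neg hlt, if_neg (by omega)]

-- indicator sums are counts
theorem pv_sum_ind {α : Type} (p : α → Prop) [DecidablePred p] (ls : List α) :
    (ls.map (fun a => if p a then (1 : Int) else 0)).sum = (ls.countP (fun a => decide (p a)) : Int) := by
  induction ls with
  | nil => simp
  | cons a ls ih => by_cases h : p a <;> simp [h, ih] <;> ring

-- the main condition splits into the two disjoint parts
theorem pv_countP_split (lines : List String) (i : Nat) :
    lines.countP (fun line => decide (PySem.Str.len line ≤ (i : Int) ∨ PySem.Str.pyGet? line (i : Int) = some ' '))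
      = lines.countP (fun line => decide (line.toList.length ≤ i))
        + lines.countP (fun line => decide (line.toList[i]? = some ' ')) := by
  induction lines with
  | nil => simp
  | cons line ls ih =>
    have hg : PySem.Str.pyGet? line (i : Int) = line.toList[i]? := by
      simp [PySem.List.pyGet?_natCast]
    have hcast : (PySem.Str.len line ≤ (i : Int)) ↔ line.toList.length ≤ i := by
      rw [PySem.Str.len_eq]; exact_mod_cast Iff.rfl
    simp only [List.countP_cons, ih]
    by_cases h1 : line.toList.length ≤ i
    · have h2 : line.toList[i]? = none := by
        rw [List.getElem?_eq_none_iff]; omega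
      rw [if_pos (by simp only [decide_eq_true_eq]; exact Or.inl (hcast.mpr h1)),
        if_pos (by simpa using h1), if_neg (by simp [h2])]
      omega
    · by_cases h2 : line.toList[i]? = some ' '
      · rw [if_pos (by simp only [decide_eq_true_eq]; exact Or.inr (by rw [hg]; exact h2)),
          if_neg (by simpa using h1), if_pos (by simpa using h2)]
        omega
      · rw [if_neg (by
            simp only [decide_eq_true_eq]
            rintro (ha | hb)
            · exact h1 (hcast.mp ha)
            · exact h2 (by rw [← hg]; exact hb)),
          if_neg (by simpa using h1), if_neg (by simpa using h2)]
        omega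

theorem pv_countP_lt_succ (ls : List String) (k : Nat) :
    ls.countP (fun l => decide (l.toList.length < k)) + ls.countP (fun l => l.toList.length == k)
      = ls.countP (fun l => decide (l.toList.length < k + 1)) := by
  induction ls with
  | nil => simp
  | cons line ls ih =>
    simp only [List.countP_cons]
    by_cases h1 : line.toList.length < k <;> by_cases h2 : line.toList.length = k
    · exfalso; omega
    · rw [if_pos (by simpa using h1), if_neg (by simpa using h2), if_pos (by simp only [decide_eq_true_eq]; omega)]
      omega
    · rw [if_neg (by simpa using h1), if_pos (by simpa using h2), if_pos (by simp only [decide_eq_true_eq]; omega)]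
      omega
    · rw [if_neg (by simpa using h1), if_neg (by simpa using h2), if_neg (by simp only [decide_eq_true_eq]; omega)]
      omega

theorem pv_sum_count_lt (lines : List String) (k : Nat) :
    ∑ l ∈ Finset.range k, lines.countP (fun line => line.toList.length == l)
      = lines.countP (fun line => decide (line.toList.length < k)) := by
  induction k with
  | zero => simp
  | succ k ih =>
    rw [Finset.sum_range_succ, ih, pv_countP_lt_succ]

theorem pv_len_nonneg (line : String) : 0 ≤ PySem.Str.len line := by
  rw [PySem.Str.len_eq]; exact Int.natCast_nonneg _

theorem pv_step_eq_max :
    (fun (m : Int) (line : String) => if PySem.Str.len line > m then PySem.Str.len line else m)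
      = fun (m : Int) (line : String) => max m (PySem.Str.len line) := by
  funext m line
  simp only [max_def]
  split_ifs <;> omega

theorem pv_foldl_max_le (xs : List String) (f : String → Int) (init c : Int)
    (h0 : init ≤ c) (h : ∀ x ∈ xs, f x ≤ c) :
    xs.foldl (fun a y => max a (f y)) init ≤ c := by
  induction xs generalizing init with
  | nil => simpa
  | cons x xs ih =>
    simp only [List.foldl_cons]
    exact ih _ (max_le h0 (h x (by simp))) (fun y hy => h y (by simp [hy]))

theorem pv_foldl_pair {α β γ : Type} (ls : List α) (f : β → α → β) (g : γ → α → γ) (b0 : β) (c0 : γ) :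
    ls.foldl (fun p a => (f p.1 a, g p.2 a)) (b0, c0) = (ls.foldl f b0, ls.foldl g c0) := by
  induction ls generalizing b0 c0 with
  | nil => rfl
  | cons a ls ih =>
    simp only [List.foldl_cons]
    exact ih _ _

theorem pv_A_char (lines : List String) (h : List Int) :
    lines.foldl (fun (h : List Int) line =>
      (List.range h.length).foldl (fun (h : List Int) (ci : Nat) =>
        if PySem.Str.len line ≤ (ci : Int) ∨ PySem.Str.pyGet? line (ci : Int) = some ' '
        then h.set ci (h.getD ci 0 + 1) else h) h) h
    = h.mapIdx (fun i x => x + (lines.map (fun line =>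
        if PySem.Str.len line ≤ (i : Int) ∨ PySem.Str.pyGet? line (i : Int) = some ' '
        then (1 : Int) else 0)).sum) := by
  have hfun : (fun (h : List Int) (line : String) =>
      (List.range h.length).foldl (fun (h : List Int) (ci : Nat) =>
        if PySem.Str.len line ≤ (ci : Int) ∨ PySem.Str.pyGet? line (ci : Int) = some ' '
        then h.set ci (h.getD ci 0 + 1) else h) h)
      = fun (h : List Int) (line : String) => h.mapIdx (fun i x => x +
          (if PySem.Str.len line ≤ (i : Int) ∨ PySem.Str.pyGet? line (i : Int) = some ' '
           then (1 : Int) else 0)) := by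
    funext h line
    exact pv_innerA_eq line h
  rw [hfun]
  exact pv_foldl_mapIdx_sum
    (fun line i => if PySem.Str.len line ≤ (i : Int) ∨ PySem.Str.pyGet? line (i : Int) = some ' '
      then (1 : Int) else 0) lines h

theorem pv_count_map_len (L : List String) (l : Nat) :
    (L.map (fun line => (PySem.Str.len line).toNat)).count l
      = L.countP (fun line => line.toList.length == l) := by
  induction L with
  | nil => rfl
  | cons a L ih =>
    have hlen : (PySem.Str.len a).toNat = a.toList.length := by
      rw [PySem.Str.len_eq]; exact Int.toNat_natCast _
    simp only [List.map_cons, List.count_cons, List.countP_cons, ih, hlen]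

-- ===== VERDICT (by name: the statement is the Claim_ definition above) =====
theorem get_section_heatmap_spec : Claim_equal_get_section_heatmap := by
  intro s _ hpre
  have hne := pv_splitlines_ne_nil s hpre
  unfold Spec_get_section_heatmap get_section_heatmap get_section_heatmap_alt
  obtain ⟨longest, hmax⟩ : ∃ m, PySem.List.max? (PySem.Str.splitlines s) PySem.Str.len = some m := by
    rcases hm : PySem.List.max? (PySem.Str.splitlines s) PySem.Str.len with _ | m
    · exact absurd ((PySem.List.max?_eq_none_iff _ _).mp hm) hne
    · exact ⟨m, rfl⟩
  simp only [hmax]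
  set L := PySem.Str.splitlines s with hL
  set M := List.foldl (fun m line => if PySem.Str.len line > m then PySem.Str.len line else m) 0 L with hM
  -- facts about M
  have hMmax : M = List.foldl (fun a y => max a (PySem.Str.len y)) 0 L := by
    rw [hM, pv_step_eq_max]
  have hfacts := PySem.List.le_foldl_max_int L PySem.Str.len 0
  have hM0 : 0 ≤ M := by rw [hMmax]; exact hfacts.1
  have hMle : ∀ line ∈ L, PySem.Str.len line ≤ M := by rw [hMmax]; exact hfacts.2
  have hlongle : PySem.Str.len longest ≤ M := hMle longest (PySem.List.max?_mem hmax)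
  have hlelong : M ≤ PySem.Str.len longest := by
    rw [hMmax]
    exact pv_foldl_max_le _ _ _ _ (pv_len_nonneg longest)
      (fun x hx => PySem.List.max?_isMax hmax x hx)
  have hLM : PySem.Str.len longest = M := le_antisymm hlongle hlelong
  have hlen_nat : ∀ line ∈ L, line.toList.length ≤ M.toNat := by
    intro line hline
    have h1 := hMle line hline
    rw [PySem.Str.len_eq] at h1
    omega
  -- LHS
  rw [hLM, pv_A_char]
  -- RHS: split the pair fold
  rw [pv_foldl_pair L
    (fun (d : List Int) (line : String) =>
      d.set (PySem.Str.len line).toNat (d.getD (PySem.Str.len line).toNat 0 + 1))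
    (fun (h : List Int) (line : String) =>
      List.foldl (fun h e => if e.2 = ' ' then h.set e.1.toNat (h.getD e.1.toNat 0 + 1) else h) h
        (PySem.List.enumerate line.toList))
    (List.replicate (M.toNat + 1) 0) (List.replicate M.toNat 0)]
  -- characterize the diff fold
  have hD : List.foldl (fun (d : List Int) (line : String) =>
        d.set (PySem.Str.len line).toNat (d.getD (PySem.Str.len line).toNat 0 + 1))
        (List.replicate (M.toNat + 1) 0) L
      = (List.replicate (M.toNat + 1) (0 : Int)).mapIdx (fun l x =>
          x + ((L.map (fun line => (PySem.Str.len line).toNat)).count l : Int)) := by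
    rw [← List.foldl_map (f := fun line : String => (PySem.Str.len line).toNat)
      (g := fun (d : List Int) (j : Nat) => d.set j (d.getD j 0 + 1))]
    apply pv_setincr_count
    intro j hj
    simp only [List.mem_map] at hj
    obtain ⟨line, hline, rfl⟩ := hj
    have h1 := hlen_nat line hline
    have h2 : (PySem.Str.len line).toNat = line.toList.length := by
      rw [PySem.Str.len_eq]; exact Int.toNat_natCast _
    simp only [List.length_replicate]
    omega
  -- characterize the space-scan fold
  have hH : List.foldl (fun (h : List Int) (line : String) =>
        List.foldl (fun h e => if e.2 = ' ' then h.set e.1.toNat (h.getD e.1.toNat 0 + 1) else h) h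
          (PySem.List.enumerate line.toList))
        (List.replicate M.toNat 0) L
      = (List.replicate M.toNat (0 : Int)).mapIdx (fun i x =>
          x + (L.map (fun line => if line.toList[i]? = some ' ' then (1 : Int) else 0)).sum) := by
    rw [pv_foldl_congr_len L _
      (fun (h : List Int) (line : String) =>
        h.mapIdx (fun i x => x + (if line.toList[i]? = some ' ' then 1 else 0)))
      (List.replicate M.toNat 0) M.toNat (by simp)
      (by intro h' a; simp)
      (by
        intro h' a ha hl
        exact pv_innerB_eq a h' (by rw [hl]; exact hlen_nat a ha))]
    exact pv_foldl_mapIdx_sum _ L _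
  rw [hD, hH, pv_prefix_fold _ _ _ _ (by simp)]
  apply List.ext_getElem (by simp)
  intro i hi1 hi2
  have hiN : i < M.toNat := by simpa using hi1
  simp only [List.getElem_mapIdx, List.getElem_replicate]
  rw [if_pos hiN]
  have hgd : ∀ l, l < M.toNat + 1 →
      ((List.replicate (M.toNat + 1) (0 : Int)).mapIdx (fun l x =>
        x + ((L.map (fun line => (PySem.Str.len line).toNat)).count l : Int))).getD l 0
      = (L.countP (fun line => line.toList.length == l) : Int) := by
    intro l hl
    rw [List.getD_eq_getElem?_getD, List.getElem?_eq_getElem (by simpa using hl)]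
    simp only [Option.getD_some, List.getElem_mapIdx, List.getElem_replicate, zero_add,
      pv_count_map_len]
  rw [Finset.sum_congr rfl (fun l hl => hgd l (by have := Finset.mem_range.mp hl; omega))]
  rw [pv_sum_ind (fun line => PySem.Str.len line ≤ (i : Int) ∨ PySem.Str.pyGet? line (i : Int) = some ' ') L]
  rw [pv_sum_ind (fun line => line.toList[i]? = some ' ') L]
  rw [← Nat.cast_sum, pv_sum_count_lt]
  have hle : L.countP (fun line => decide (line.toList.length < i + 1))
      = L.countP (fun line => decide (line.toList.length ≤ i)) :=
    List.countP_congr (fun line _ => by simp only [decide_eq_true_eq]; omega)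
  rw [hle]
  have hsplit := pv_countP_split L i
  omega

@[simp]
theorem get_section_heatmap_raises : Claim_raises_get_section_heatmap := by
  unfold Claim_raises_get_section_heatmap
  constructor
  · intro s _ hr
    unfold Raises_get_section_heatmap at hr
    unfold Pre_get_section_heatmap
    simp [hr]
  · exact ⟨by decide, by decide, by decide⟩
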